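-- pv_equiv track=rewrite | github.com/jumelet/fidam-eval | fidameval/explain/evaluate/true_deps.py | gen_dyck_deps
-- ===== SOURCE A (Python) =====
-- def gen_dyck_deps(input_list):
--     stack = []
--     deps = []
--     for idx, x in enumerate(input_list):
--         if x < 2:
--             stack.append((idx, x))
--         else:
--             prev_idx, y = stack.pop()
--             assert (x - 2) == y, "string not well formed"
--             deps.append((prev_idx, idx))
--
--     return deps
-- ===== SOURCE B (Python) =====
-- def gen_dyck_deps(input_list):
--     deps = []
--     for j, x in enumerate(input_list):
--         if x >= 2:
--             bal = 0
--             for i in range(j - 1, -1, -1):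
--                 if input_list[i] >= 2:
--                     bal += 1
--                 elif bal:
--                     bal -= 1
--                 else:
--                     assert x - 2 == input_list[i], "string not well formed"
--                     deps.append((i, j))
--                     break
--             else:
--                 raise IndexError("unmatched closing bracket")
--     return deps
-- ===== Notes on version B (the rewrite author's own statement) =====
-- stated objective: alternative
-- what changed: Replaces the single stack-driven pass with a stack-free formulation: for each closing bracket a backward balance-counting scan locates its matching opener directly (asserting the paired value and erroring on an unmatched closer, like A).
import Mathlib
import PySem

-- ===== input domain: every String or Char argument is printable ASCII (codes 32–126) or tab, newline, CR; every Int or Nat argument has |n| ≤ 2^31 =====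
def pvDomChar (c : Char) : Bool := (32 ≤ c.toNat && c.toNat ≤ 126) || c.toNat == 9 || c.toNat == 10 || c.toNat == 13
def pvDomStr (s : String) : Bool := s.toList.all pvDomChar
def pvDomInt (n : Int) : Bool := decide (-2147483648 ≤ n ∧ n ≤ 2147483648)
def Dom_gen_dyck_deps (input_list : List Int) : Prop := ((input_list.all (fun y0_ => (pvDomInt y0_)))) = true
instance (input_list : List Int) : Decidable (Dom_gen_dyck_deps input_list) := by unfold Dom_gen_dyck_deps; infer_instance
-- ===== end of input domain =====

-- B replaces A's stack loop by a per-closer backward balance scan (alternative decomposition, not faster).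
-- Equivalence is claimed on Pre_: exactly the inputs where A returns (no IndexError / AssertionError).

-- ===== PORT A =====
-- literal port of A's loop: stack of (idx, value), pop returns none where Python raises
def loopA (l : List Int) : List Int → Nat → List (Nat × Int) → List (Int × Int) → Option (List (Int × Int))
  | [], _, _, deps => some deps
  | x :: rest, idx, stack, deps =>
    if x < 2 then loopA l rest (idx + 1) ((idx, x) :: stack) deps
    else
      match stack with
      | [] => none  -- Python: IndexError on stack.pop()
      | (prev_idx, y) :: s =>
        if x - 2 = y then loopA l rest (idx + 1) s (deps ++ [((prev_idx : Int), (idx : Int))])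
        else none  -- Python: AssertionError "string not well formed"

def gen_dyck_deps (input_list : List Int) : List (Int × Int) :=
  (loopA input_list input_list 0 [] []).getD []

-- ===== PORT B =====
-- backward scan from index k-1 down to 0 with balance counter (B's inner for-loop)
def scanB (l : List Int) : Nat → Nat → Option Nat
  | 0, _ => none
  | k + 1, bal =>
    if 2 ≤ l.getD k 0 then scanB l k (bal + 1)
    else if bal ≠ 0 then scanB l k (bal - 1)
    else some k

-- one closer step of B: scan backward; none where B's Python raises (unmatched closer / failed assert)
def stepB (l : List Int) (deps : List (Int × Int)) (j : Nat) : Option (List (Int × Int)) :=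
  if 2 ≤ l.getD j 0 then
    match scanB l j 0 with
    | some i =>
      if l.getD j 0 - 2 = l.getD i 0 then some (deps ++ [((i : Int), (j : Int))])
      else none  -- Python: AssertionError "string not well formed"
    | none => none  -- Python: IndexError "unmatched closing bracket"
  else some deps

def gen_dyck_deps_alt (input_list : List Int) : List (Int × Int) :=
  ((List.range input_list.length).foldl
    (fun st j => st.bind (fun deps => stepB input_list deps j)) (some [])).getD []

-- ===== PRECONDITION & SPEC =====
-- depth of the bracket string before position j (#openers − #closers among the first j elements)
def dep_d (l : List Int) (j : Nat) : Int :=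
  ((List.range j).countP (fun i => decide (l.getD i 0 < 2)) : Int)
    - ((List.range j).countP (fun i => !decide (l.getD i 0 < 2)) : Int)

-- Exactly the inputs on which A returns: every closer j has positive depth (no IndexError), and the
-- matching opener (latest i<j at depth dep_d j − 1) carries the paired value (no AssertionError).
def Pre_gen_dyck_deps (input_list : List Int) : Prop :=
  ∀ j ∈ List.range input_list.length, 2 ≤ input_list.getD j 0 →
    1 ≤ dep_d input_list j ∧
    ∀ i ∈ List.range j, input_list.getD i 0 < 2 → dep_d input_list i = dep_d input_list j - 1 →
      (∀ k ∈ List.range j, i < k → input_list.getD k 0 < 2 → dep_d input_list k ≠ dep_d input_list j - 1) →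
      input_list.getD j 0 = input_list.getD i 0 + 2
instance (input_list : List Int) : Decidable (Pre_gen_dyck_deps input_list) := by
  unfold Pre_gen_dyck_deps; infer_instance

def pvWitness_gen_dyck_deps : List Int := [0, 2, 1, 0, 2, 3]

def Spec_gen_dyck_deps (input_list : List Int) (out : List (Int × Int)) : Prop := out = gen_dyck_deps_alt input_list
instance (input_list : List Int) (out : List (Int × Int)) : Decidable (Spec_gen_dyck_deps input_list out) := by unfold Spec_gen_dyck_deps; infer_instance

-- ===== CLAIM (what is proved, stated in full; the proofs are below) =====
def Claim_equal_gen_dyck_deps : Prop := ∀ (input_list : List Int), Dom_gen_dyck_deps input_list → Pre_gen_dyck_deps input_list → Spec_gen_dyck_deps input_list (gen_dyck_deps input_list)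

-- ===== LEMMAS AND PROOFS =====

-- the stack A holds after processing the first j elements (pop on empty stack modelled as tail [] = [])
def stackOf (l : List Int) (j : Nat) : List (Nat × Int) :=
  (List.range j).foldl (fun s i => if l.getD i 0 < 2 then (i, l.getD i 0) :: s else s.tail) []

theorem stackOf_succ (l : List Int) (j : Nat) :
    stackOf l (j + 1) =
      if l.getD j 0 < 2 then (j, l.getD j 0) :: stackOf l j else (stackOf l j).tail := by
  simp [stackOf, List.range_succ, List.foldl_append]

theorem dep_d_succ (l : List Int) (j : Nat) :
    dep_d l (j + 1) = if l.getD j 0 < 2 then dep_d l j + 1 else dep_d l j - 1 := by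
  by_cases h : l.getD j 0 < 2
  · simp only [dep_d, List.range_succ, List.countP_append, List.countP_singleton, h,
      decide_true, Bool.not_true]
    push_cast; ring
  · simp only [dep_d, List.range_succ, List.countP_append, List.countP_singleton, h,
      decide_false, Bool.not_false]
    push_cast; ring

theorem scanB_succ (l : List Int) (k bal : Nat) :
    scanB l (k + 1) bal =
      if 2 ≤ l.getD k 0 then scanB l k (bal + 1)
      else if bal ≠ 0 then scanB l k (bal - 1)
      else some k := rfl

-- B's backward scan reads off the stack: scanB l j bal is the bal-th element (index) of the stack at j
theorem scanB_eq_stack (l : List Int) :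
    ∀ j bal, scanB l j bal = ((stackOf l j)[bal]?).map Prod.fst := by
  intro j
  induction j with
  | zero => intro bal; simp [scanB, stackOf]
  | succ j ih =>
    intro bal
    rw [stackOf_succ]
    by_cases h : 2 ≤ l.getD j 0
    · rw [scanB_succ, if_pos h, if_neg (by omega : ¬ l.getD j 0 < 2), ih, List.getElem?_tail]
    · have hlt : l.getD j 0 < 2 := by omega
      rw [scanB_succ, if_neg h, if_pos hlt]
      cases bal with
      | zero => simp
      | succ b => rw [if_pos (by simp), ih]; simp

-- structural invariant of the stack: each element is an opener at the right depth, below all later depths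
theorem stack_inv (l : List Int) :
    ∀ j, ∀ (t i : Nat) (v : Int), (stackOf l j)[t]? = some (i, v) →
      i < j ∧ v = l.getD i 0 ∧ v < 2 ∧ dep_d l i = dep_d l j - 1 - (t : Int) ∧
        ∀ k, i < k → k ≤ j → dep_d l i < dep_d l k := by
  intro j
  induction j with
  | zero => intro t i v h; simp [stackOf] at h
  | succ j ih =>
    intro t i v h
    rw [stackOf_succ] at h
    have hd := dep_d_succ l j
    by_cases hx : l.getD j 0 < 2
    · rw [if_pos hx] at h
      cases t with
      | zero =>
        rw [List.getElem?_cons_zero] at h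
        injection h with h'
        obtain ⟨rfl, rfl⟩ := Prod.mk.injEq .. ▸ h'
        refine ⟨Nat.lt_succ_self _, rfl, hx, ?_, ?_⟩
        · rw [hd, if_pos hx]; push_cast; ring
        · intro k hk1 hk2
          have : k = j + 1 := by omega
          subst this
          rw [hd, if_pos hx]; omega
      | succ b =>
        rw [List.getElem?_cons_succ] at h
        obtain ⟨h1, h2, h3, h4, h5⟩ := ih b i v h
        refine ⟨by omega, h2, h3, ?_, ?_⟩
        · rw [hd, if_pos hx]; push_cast at h4 ⊢; omega
        · intro k hk1 hk2
          by_cases hkj : k ≤ j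
          · exact h5 k hk1 hkj
          · have : k = j + 1 := by omega
            subst this
            rw [hd, if_pos hx]; omega
    · rw [if_neg hx] at h
      rw [List.getElem?_tail] at h
      obtain ⟨h1, h2, h3, h4, h5⟩ := ih (t + 1) i v h
      refine ⟨by omega, h2, h3, ?_, ?_⟩
      · rw [hd, if_neg hx]; push_cast at h4 ⊢; omega
      · intro k hk1 hk2
        by_cases hkj : k ≤ j
        · exact h5 k hk1 hkj
        · have : k = j + 1 := by omega
          subst this
          rw [hd, if_neg hx]; push_cast at h4; omega

-- stack size equals the depth, on inputs A accepts
theorem stack_len (l : List Int) (hp : Pre_gen_dyck_deps l) :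
    ∀ j, j ≤ l.length → ((stackOf l j).length : Int) = dep_d l j := by
  intro j
  induction j with
  | zero => intro _; simp [stackOf, dep_d]
  | succ j ih =>
    intro hj
    have ihj := ih (by omega)
    rw [stackOf_succ, dep_d_succ]
    by_cases hx : l.getD j 0 < 2
    · rw [if_pos hx, if_pos hx]
      simp only [List.length_cons]
      push_cast
      omega
    · have h2 : 2 ≤ l.getD j 0 := by omega
      have hdj := (hp j (List.mem_range.mpr (by omega)) h2).1
      have hne : stackOf l j ≠ [] := by
        intro hnil; rw [hnil] at ihj; simp at ihj; omega
      rw [if_neg hx, if_neg hx]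
      have ht : (stackOf l j).tail.length = (stackOf l j).length - 1 := List.length_tail
      have hlen : 1 ≤ (stackOf l j).length := List.length_pos_iff.mpr hne
      rw [ht]
      omega

theorem main_lemma (l : List Int) (hp : Pre_gen_dyck_deps l) :
    ∀ m j deps, j + m = l.length →
      loopA l (l.drop j) j (stackOf l j) deps =
        some (deps ++ (List.range' j m).flatMap (fun j' =>
          if 2 ≤ l.getD j' 0 then
            match scanB l j' 0 with
            | some i => [((i : Int), (j' : Int))]
            | none => ([] : List (Int × Int))
          else [])) := by
  intro m
  induction m with
  | zero =>
    intro j deps hj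
    have : j = l.length := by omega
    subst this
    simp [List.drop_length, loopA]
  | succ m ih =>
    intro j deps hj
    have hjn : j < l.length := by omega
    have hdrop : l.drop j = l[j] :: l.drop (j + 1) := List.drop_eq_getElem_cons hjn
    have hget : l.getD j 0 = l[j] := by
      simp [List.getD_eq_getElem?_getD, List.getElem?_eq_getElem hjn]
    rw [hdrop]
    have hr : List.range' j (m + 1) = j :: List.range' (j + 1) m := by
      simp [List.range'_succ]
    by_cases hx : l[j] < 2
    · simp only [loopA]
      rw [if_pos hx, ← hget]
      have hst : stackOf l (j + 1) = (j, l.getD j 0) :: stackOf l j := by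
        rw [stackOf_succ, if_pos (by omega : l.getD j 0 < 2)]
      rw [← hst, ih (j + 1) deps (by omega), hr]
      have hno : ¬ 2 ≤ l.getD j 0 := by omega
      rw [List.flatMap_cons, if_neg hno, List.nil_append]
    · -- closer
      have h2 : 2 ≤ l.getD j 0 := by rw [hget]; omega
      have hdj := (hp j (List.mem_range.mpr hjn) h2).1
      have hlen := stack_len l hp j (by omega)
      have hne : stackOf l j ≠ [] := by
        intro hnil; rw [hnil] at hlen; simp at hlen; omega
      obtain ⟨⟨i0, y⟩, s', hs⟩ := List.exists_cons_of_ne_nil hne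
      have hinv := stack_inv l j 0 i0 y (by rw [hs]; rfl)
      obtain ⟨hi0j, hy, hy2, hdi, hmax⟩ := hinv
      have hdi' : dep_d l i0 = dep_d l j - 1 := by push_cast at hdi; omega
      have hval : l.getD j 0 = l.getD i0 0 + 2 := by
        refine (hp j (List.mem_range.mpr hjn) h2).2 i0 (List.mem_range.mpr hi0j) (by omega) hdi' ?_
        intro k hk1 hk2 hk3 hk4
        have hkj := List.mem_range.mp hk1
        have := hmax k hk2 (by omega)
        omega
      have hxy : l[j] - 2 = y := by
        rw [← hget, hval, hy]; ring
      rw [hs]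
      simp only [loopA]
      rw [if_neg (by omega : ¬ l[j] < 2), if_pos hxy]
      have hst : stackOf l (j + 1) = s' := by
        rw [stackOf_succ, if_neg (by omega : ¬ l.getD j 0 < 2), hs, List.tail_cons]
      rw [← hst, ih (j + 1) (deps ++ [((i0 : Int), (j : Int))]) (by omega), hr]
      have hscan : scanB l j 0 = some i0 := by
        rw [scanB_eq_stack, hs]; rfl
      simp only [List.flatMap_cons, if_pos h2, hscan, List.append_assoc]

-- B's Option-threaded foldl, under Pre_, succeeds and unfolds to a flatMap over indices
theorem alt_main (l : List Int) (hp : Pre_gen_dyck_deps l) :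
    ∀ m j deps, j + m = l.length →
      (List.range' j m).foldl (fun st j' => st.bind (fun deps' => stepB l deps' j')) (some deps) =
        some (deps ++ (List.range' j m).flatMap (fun j' =>
          if 2 ≤ l.getD j' 0 then
            match scanB l j' 0 with
            | some i => [((i : Int), (j' : Int))]
            | none => ([] : List (Int × Int))
          else [])) := by
  intro m
  induction m with
  | zero => intro j deps _; simp
  | succ m ih =>
    intro j deps hj
    have hjn : j < l.length := by omega
    have hr : List.range' j (m + 1) = j :: List.range' (j + 1) m := by
      simp [List.range'_succ]
    rw [hr]
    by_cases h2 : 2 ≤ l.getD j 0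
    · have hdj := (hp j (List.mem_range.mpr hjn) h2).1
      have hlen := stack_len l hp j (by omega)
      have hne : stackOf l j ≠ [] := by
        intro hnil; rw [hnil] at hlen; simp at hlen; omega
      obtain ⟨⟨i0, y⟩, s', hs⟩ := List.exists_cons_of_ne_nil hne
      obtain ⟨hi0j, hy, hy2, hdi, hmax⟩ := stack_inv l j 0 i0 y (by rw [hs]; rfl)
      have hdi' : dep_d l i0 = dep_d l j - 1 := by push_cast at hdi; omega
      have hval : l.getD j 0 = l.getD i0 0 + 2 := by
        refine (hp j (List.mem_range.mpr hjn) h2).2 i0 (List.mem_range.mpr hi0j) (by omega) hdi' ?_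
        intro k hk1 hk2 hk3 hk4
        have hkj := List.mem_range.mp hk1
        have := hmax k hk2 (by omega)
        omega
      have hscan : scanB l j 0 = some i0 := by
        rw [scanB_eq_stack, hs]; rfl
      have hstep : stepB l deps j = some (deps ++ [((i0 : Int), (j : Int))]) := by
        rw [stepB, if_pos h2, hscan]
        simp only [if_pos (by omega : l.getD j 0 - 2 = l.getD i0 0)]
      rw [List.foldl_cons]
      have hb : ((some deps).bind fun deps' => stepB l deps' j) = some (deps ++ [((i0 : Int), (j : Int))]) := by
        simp [hstep]
      rw [hb, ih (j + 1) (deps ++ [((i0 : Int), (j : Int))]) (by omega)]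
      simp only [List.flatMap_cons, if_pos h2, hscan, List.append_assoc]
    · have hstep : stepB l deps j = some deps := by rw [stepB, if_neg h2]
      rw [List.foldl_cons]
      have hb : ((some deps).bind fun deps' => stepB l deps' j) = some deps := by
        simp [hstep]
      rw [hb, ih (j + 1) deps (by omega)]
      rw [List.flatMap_cons, if_neg h2, List.nil_append]

-- ===== VERDICT (by name: the statement is the Claim_ definition above) =====
theorem gen_dyck_deps_spec : Claim_equal_gen_dyck_deps := by
  intro l _ hp
  unfold Spec_gen_dyck_deps gen_dyck_deps gen_dyck_deps_alt
  have h := main_lemma l hp l.length 0 [] (by omega)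
  simp only [List.drop_zero] at h
  have h0 : stackOf l 0 = [] := by simp [stackOf]
  rw [h0] at h
  rw [h, List.range_eq_range', alt_main l hp l.length 0 [] (by omega)]
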